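-- pv_equiv track=rewrite | github.com/alan-turing-institute/AIrsenal | airsenal/scripts/fill_transfersuggestion_table_tree.py | count_expected_outputs
-- ===== SOURCE A (Python) =====
-- def count_expected_outputs(week, max_week, can_play_wildcard, can_play_free_hit):
--     week += 1
--     if week == max_week:
--         return 3 + int(can_play_wildcard) + int(can_play_free_hit)
--     total = 0
--     for _ in range(3):
--         total += count_expected_outputs(week, max_week, can_play_wildcard, can_play_free_hit)
--     if can_play_wildcard:
--         total += count_expected_outputs(week, max_week, False, can_play_free_hit)
--     if can_play_free_hit:
--         total += count_expected_outputs(week, max_week, can_play_wildcard, False)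
--     return total
-- ===== SOURCE B (Python) =====
-- def count_expected_outputs(week, max_week, can_play_wildcard, can_play_free_hit):
--     # Closed form over the remaining depth d: 3 moves per week, plus one-shot
--     # wildcard/free-hit branches -> 3*3^d, (d+4)*3^d, or (d^2+7d+15)*3^(d-1).
--     d = max_week - week - 1
--     if can_play_wildcard and can_play_free_hit:
--         return 5 if d == 0 else (d * d + 7 * d + 15) * 3 ** (d - 1)
--     if can_play_wildcard or can_play_free_hit:
--         return (d + 4) * 3 ** d
--     return 3 * 3 ** d
-- ===== Notes on version B (the rewrite author's own statement) =====
-- stated objective: faster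
-- what changed: Replaced A's 3-to-5-way recursion over every remaining week by a closed-form formula in the remaining depth d = max_week - week - 1 (case split on the two chip flags: 3*3^d, (d+4)*3^d, or (d^2+7d+15)*3^(d-1)); intended as faster — measured ~303x at the largest size where A still finished, unconfirmed beyond because A times out.
import Mathlib
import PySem

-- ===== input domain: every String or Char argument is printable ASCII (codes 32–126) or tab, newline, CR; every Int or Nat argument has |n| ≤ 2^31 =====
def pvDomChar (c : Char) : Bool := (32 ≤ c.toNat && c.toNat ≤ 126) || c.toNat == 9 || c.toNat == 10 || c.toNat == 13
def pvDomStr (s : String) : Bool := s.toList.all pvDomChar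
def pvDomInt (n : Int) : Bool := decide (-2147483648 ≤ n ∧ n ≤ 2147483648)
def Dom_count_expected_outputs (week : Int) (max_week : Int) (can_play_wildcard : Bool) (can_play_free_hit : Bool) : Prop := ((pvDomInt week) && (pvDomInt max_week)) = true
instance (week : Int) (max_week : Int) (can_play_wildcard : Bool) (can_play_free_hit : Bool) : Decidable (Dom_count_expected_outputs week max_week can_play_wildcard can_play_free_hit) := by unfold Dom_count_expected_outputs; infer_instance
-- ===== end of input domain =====

-- B replaces A's five-way recursion over the remaining weeks by a closed-form
-- formula in the remaining depth (intended as faster; a timing run read B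
-- ~300x faster at the largest size where A still finished, unconfirmed beyond).

-- ===== PORT A =====
-- A is a recursion that only terminates when week < max_week; the port uses a fuel
-- of (max_week - week).toNat, which Pre_ guarantees is sufficient (0 on exhaustion,
-- never reached inside Pre_).
def countA_fuel : Nat → Int → Int → Bool → Bool → Int
  | 0, _, _, _, _ => 0
  | Nat.succ fuel, week, max_week, wc, fh =>
    let week := week + 1
    if week = max_week then
      3 + (if wc then (1:Int) else 0) + (if fh then (1:Int) else 0)
    else
      let total : Int := (PySem.List.pyRange 0 3 1).foldl
        (fun t _ => t + countA_fuel fuel week max_week wc fh) 0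
      let total := if wc then total + countA_fuel fuel week max_week false fh else total
      let total := if fh then total + countA_fuel fuel week max_week wc false else total
      total

def count_expected_outputs (week : Int) (max_week : Int) (can_play_wildcard : Bool) (can_play_free_hit : Bool) : Int :=
  countA_fuel (max_week - week).toNat week max_week can_play_wildcard can_play_free_hit

-- ===== PORT B =====
def count_expected_outputs_alt (week : Int) (max_week : Int) (can_play_wildcard : Bool) (can_play_free_hit : Bool) : Int :=
  let d := max_week - week - 1
  if can_play_wildcard && can_play_free_hit then
    if d = 0 then 5 else (d * d + 7 * d + 15) * 3 ^ (d - 1).toNat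
  else if can_play_wildcard || can_play_free_hit then
    (d + 4) * 3 ^ d.toNat
  else
    3 * 3 ^ d.toNat

-- ===== PRECONDITION & SPEC =====
-- A's recursion never reaches its base case when week ≥ max_week (Python A raises
-- RecursionError there), so exactly those inputs are excluded.
def Pre_count_expected_outputs (week : Int) (max_week : Int) (can_play_wildcard : Bool) (can_play_free_hit : Bool) : Prop :=
  week < max_week
instance (week : Int) (max_week : Int) (can_play_wildcard : Bool) (can_play_free_hit : Bool) : Decidable (Pre_count_expected_outputs week max_week can_play_wildcard can_play_free_hit) := by unfold Pre_count_expected_outputs; infer_instance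

def pvWitness_count_expected_outputs : Int × Int × Bool × Bool := (1, 4, true, false)

def Spec_count_expected_outputs (week : Int) (max_week : Int) (can_play_wildcard : Bool) (can_play_free_hit : Bool) (out : Int) : Prop := out = count_expected_outputs_alt week max_week can_play_wildcard can_play_free_hit
instance (week : Int) (max_week : Int) (can_play_wildcard : Bool) (can_play_free_hit : Bool) (out : Int) : Decidable (Spec_count_expected_outputs week max_week can_play_wildcard can_play_free_hit out) := by unfold Spec_count_expected_outputs; infer_instance

-- ===== CLAIM (what is proved, stated in full; the proofs are below) =====
def Claim_equal_count_expected_outputs : Prop := ∀ (week : Int) (max_week : Int) (can_play_wildcard : Bool) (can_play_free_hit : Bool), Dom_count_expected_outputs week max_week can_play_wildcard can_play_free_hit → Pre_count_expected_outputs week max_week can_play_wildcard can_play_free_hit → Spec_count_expected_outputs week max_week can_play_wildcard can_play_free_hit (count_expected_outputs week max_week can_play_wildcard can_play_free_hit)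

-- ===== LEMMAS AND PROOFS =====

-- B's closed form, as a function of the remaining depth n = max_week - week - 1.
def altN (n : Nat) (wc fh : Bool) : Int :=
  if wc && fh then
    if n = 0 then 5 else ((n : Int) * n + 7 * n + 15) * 3 ^ (n - 1)
  else if wc || fh then
    ((n : Int) + 4) * 3 ^ n
  else
    3 * 3 ^ n

lemma alt_eq_altN (n : Nat) (week mw : Int) (wc fh : Bool) (h : mw = week + 1 + (n : Int)) :
    count_expected_outputs_alt week mw wc fh = altN n wc fh := by
  have hd : mw - week - 1 = (n : Int) := by omega
  rcases n with _ | m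
  · cases wc <;> cases fh <;> simp [count_expected_outputs_alt, altN, hd]
  · have h0 : ¬ ((((m + 1 : Nat)) : Int) = 0) := by omega
    have h1 : ((((m + 1 : Nat)) : Int) - 1).toNat = m := by omega
    cases wc <;> cases fh <;>
      simp [count_expected_outputs_alt, altN, hd, h0, h1] <;>
      (intro h2; exact absurd h2 (by omega))

lemma countA_fuel_succ (fuel : Nat) (week max_week : Int) (wc fh : Bool) :
    countA_fuel (fuel + 1) week max_week wc fh =
      (let week := week + 1
       if week = max_week then
         3 + (if wc then (1:Int) else 0) + (if fh then (1:Int) else 0)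
       else
         let total : Int := (PySem.List.pyRange 0 3 1).foldl
           (fun t _ => t + countA_fuel fuel week max_week wc fh) 0
         let total := if wc then total + countA_fuel fuel week max_week false fh else total
         let total := if fh then total + countA_fuel fuel week max_week wc false else total
         total) := rfl

lemma altN_step_ff (n : Nat) : altN (n + 1) false false = 3 * altN n false false := by
  simp only [altN]
  simp [pow_succ]
  ring

lemma altN_step_tf (n : Nat) :
    altN (n + 1) true false = 3 * altN n true false + altN n false false := by
  simp only [altN]
  simp [pow_succ]
  ring

lemma altN_step_ft (n : Nat) :
    altN (n + 1) false true = 3 * altN n false true + altN n false false := by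
  simp only [altN]
  simp [pow_succ]
  ring

lemma altN_step_tt (n : Nat) :
    altN (n + 1) true true = 3 * altN n true true + altN n false true + altN n true false := by
  rcases n with _ | m
  · decide
  · simp only [altN]
    simp [pow_succ]
    push_cast
    ring

lemma pyRange3 : PySem.List.pyRange 0 3 1 = [0, 1, 2] := by decide

lemma countA_eq (n : Nat) : ∀ (week mw : Int) (wc fh : Bool), mw = week + 1 + (n : Int) →
    countA_fuel (n + 1) week mw wc fh = altN n wc fh := by
  induction n with
  | zero =>
    intro week mw wc fh h
    have he : week + 1 = mw := by omega
    cases wc <;> cases fh <;> simp [countA_fuel, he, altN]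
  | succ m ih =>
    intro week mw wc fh h
    have hne : ¬ (week + 1 = mw) := by push_cast at h; omega
    have h' : mw = (week + 1) + 1 + (m : Int) := by push_cast at h ⊢; omega
    have hr : ∀ wc' fh', countA_fuel (m + 1) (week + 1) mw wc' fh' = altN m wc' fh' :=
      fun wc' fh' => ih (week + 1) mw wc' fh' h'
    rw [countA_fuel_succ]
    simp only [if_neg hne, pyRange3, List.foldl, hr]
    cases wc <;> cases fh <;>
      simp only [if_true, if_false, Bool.false_eq_true, altN_step_ff, altN_step_tf,
        altN_step_ft, altN_step_tt, ite_true, ite_false] <;> ring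

-- ===== VERDICT (by name: the statement is the Claim_ definition above) =====
theorem count_expected_outputs_spec : Claim_equal_count_expected_outputs := by
  intro week mw wc fh _ hpre
  unfold Pre_count_expected_outputs at hpre
  unfold Spec_count_expected_outputs
  set n : Nat := (mw - week - 1).toNat with hn0
  have hmw : mw = week + 1 + (n : Int) := by omega
  have hfuel : (mw - week).toNat = n + 1 := by omega
  rw [count_expected_outputs, hfuel, countA_eq n week mw wc fh hmw,
    alt_eq_altN n week mw wc fh hmw]
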